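-- pv_equiv track=rewrite | github.com/KAESH1/ZeldaLike | pnj_gestion.py | dBox
-- ===== SOURCE A (Python) =====
-- def dBox(num, T):
--     coord = [0,0]
--     k=0
--     for i in range(len(T)):
--         for j in range(len(T[i])):
--             if T[i][j] == 4:
--                 k+=1
--                 if k == num:
--                     coord[0] = j
--                     coord[1] = i
--                     return coord
-- ===== SOURCE B (Python) =====
-- def dBox(num, T):
--     counts = [row.count(4) for row in T]
--     if not (1 <= num <= sum(counts)):
--         return None
--     i, rem = 0, num
--     while rem > counts[i]:
--         rem -= counts[i]
--         i += 1
--     j = -1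
--     for _ in range(rem):
--         j = T[i].index(4, j + 1)
--     return [j, i]
-- ===== Notes on version B (the rewrite author's own statement) =====
-- stated objective: alternative
-- what changed: B replaces A's single nested scan with a manual counter by a staged count-then-locate algorithm: it first counts the 4s per row, selects the target row arithmetically by subtracting row counts, and then finds the column with repeated list.index(4, start) calls.
import Mathlib
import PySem

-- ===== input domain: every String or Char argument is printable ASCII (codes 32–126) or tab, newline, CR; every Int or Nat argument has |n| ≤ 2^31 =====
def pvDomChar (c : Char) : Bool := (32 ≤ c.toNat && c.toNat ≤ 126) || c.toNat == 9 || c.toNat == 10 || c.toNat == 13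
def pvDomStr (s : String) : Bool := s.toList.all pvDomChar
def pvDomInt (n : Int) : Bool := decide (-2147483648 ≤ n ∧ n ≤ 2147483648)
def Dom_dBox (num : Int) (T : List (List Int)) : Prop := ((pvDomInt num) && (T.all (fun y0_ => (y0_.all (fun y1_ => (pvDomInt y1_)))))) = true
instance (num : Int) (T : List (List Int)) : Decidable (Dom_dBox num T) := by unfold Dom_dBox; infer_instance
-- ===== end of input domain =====

-- B replaces A's nested scan with a manual counter by a staged count-then-locate
-- algorithm: per-row counts of 4, arithmetic row selection, then repeated
-- row.index(4, start) calls for the column (alternative decomposition).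

-- ===== PORT A =====
-- inner loop over one row: index j, counter k; returns (early-return result, counter after)
def dBoxRow (num : Int) (i : Int) (j : Int) (k : Int) : List Int → Option (List Int) × Int
  | [] => (none, k)
  | v :: rest =>
    if v = 4 then
      if k + 1 = num then (some [j, i], k + 1)
      else dBoxRow num i (j + 1) (k + 1) rest
    else dBoxRow num i (j + 1) k rest

-- outer loop over the rows: index i, threading the counter k
def dBoxRows (num : Int) (i : Int) (k : Int) : List (List Int) → Option (List Int)
  | [] => none
  | r :: rest =>
    match dBoxRow num i 0 k r with
    | (some c, _) => some c
    | (none, k') => dBoxRows num (i + 1) k' rest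

def dBox (num : Int) (T : List (List Int)) : Option (List Int) :=
  dBoxRows num 0 0 T

-- ===== PORT B =====
-- row.count(4)
def count4 (row : List Int) : Int := (PySem.List.count row 4 : Int)

-- the while loop: while rem > counts[i]: rem -= counts[i]; i += 1
-- (under B's guard the loop stops before counts is exhausted; [] is unreachable)
def selectRow : List Int → Int → Int → Int × Int
  | [], i, rem => (i, rem)
  | c :: cs, i, rem => if c < rem then selectRow cs (i + 1) (rem - c) else (i, rem)

-- row.index(4, s) with s ≥ 0: first index k ≥ s holding 4; Python raises ValueError
-- when absent, which is unreachable under B's guard (the port returns len(row) there)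
def idx4Aux : List Int → Int → Int → Int
  | [], k, _ => k
  | v :: rest, k, s => if s ≤ k ∧ v = 4 then k else idx4Aux rest (k + 1) s

-- the for loop: for _ in range(rem): j = row.index(4, j + 1)
def nth4 (row : List Int) : Nat → Int → Int
  | 0, j => j
  | n + 1, j => nth4 row n (idx4Aux row 0 (j + 1))

def dBox_alt (num : Int) (T : List (List Int)) : Option (List Int) :=
  -- counts = [row.count(4) for row in T] is T.map count4 (inlined local)
  if 1 ≤ num ∧ num ≤ (T.map count4).sum then
    match selectRow (T.map count4) 0 num with
    | (i, rem) =>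
      -- T[i]: i is a valid nonnegative index under the guard
      some [nth4 ((T[i.toNat]?).getD []) rem.toNat (-1), i]
  else none

-- ===== PRECONDITION & SPEC =====
def Spec_dBox (num : Int) (T : List (List Int)) (out : Option (List Int)) : Prop := out = dBox_alt num T
instance (num : Int) (T : List (List Int)) (out : Option (List Int)) : Decidable (Spec_dBox num T out) := by unfold Spec_dBox; infer_instance

-- ===== CLAIM (what is proved, stated in full; the proofs are below) =====
def Claim_equal_dBox : Prop := ∀ (num : Int) (T : List (List Int)), Dom_dBox num T → Spec_dBox num T (dBox num T)

-- ===== LEMMAS AND PROOFS =====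

-- positions of value 4 in one row, columns starting at j, as [col, i] pairs
def prow (i j : Int) : List Int → List (List Int)
  | [] => []
  | v :: rest => (if v = 4 then [[j, i]] else []) ++ prow i (j + 1) rest

-- positions of value 4 in all rows, row indices starting at i
def pall (i : Int) : List (List Int) → List (List Int)
  | [] => []
  | r :: rest => prow i 0 r ++ pall (i + 1) rest

-- columns of the 4s in a row, starting at column k
def cols : List Int → Int → List Int
  | [], _ => []
  | v :: rest, k => (if v = 4 then [k] else []) ++ cols rest (k + 1)

-- first element of C that is ≥ s, default d
def firstGE : List Int → Int → Int → Int
  | [], _, d => d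
  | c :: cs, s, d => if s ≤ c then c else firstGE cs s d

-- the abstract index-walk: n steps of j := firstGE C (j+1) d
def walk (C : List Int) (d : Int) : Nat → Int → Int
  | 0, j => j
  | n + 1, j => walk C d n (firstGE C (j + 1) d)

-- ===== A-side characterisation =====

theorem rowA_none (row : List Int) (num i : Int) :
    ∀ j k, ¬ (k < num ∧ num ≤ k + (prow i j row).length) →
      dBoxRow num i j k row = (none, k + (prow i j row).length) := by
  induction row with
  | nil => intro j k _; simp [dBoxRow, prow]
  | cons v rest ih =>
    intro j k h
    by_cases hv : v = 4
    · have hlen : (prow i j (v :: rest)).length = (prow i (j + 1) rest).length + 1 := by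
        simp [prow, hv]
      rw [hlen] at h
      have hne : ¬ (k + 1 = num) := by
        intro he; exact h (by omega)
      simp only [dBoxRow, if_pos hv, if_neg hne]
      rw [ih (j + 1) (k + 1) (by omega), hlen]
      simp only [Prod.mk.injEq, true_and]
      push_cast
      ring
    · have hlen : (prow i j (v :: rest)).length = (prow i (j + 1) rest).length := by
        simp [prow, hv]
      rw [hlen] at h
      simp only [dBoxRow, if_neg hv]
      rw [ih (j + 1) k h, hlen]

theorem rowA_some (row : List Int) (num i : Int) :
    ∀ j k, k < num → num ≤ k + (prow i j row).length →
      (dBoxRow num i j k row).1 = (prow i j row)[(num - k - 1).toNat]? := by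
  induction row with
  | nil => intro j k h1 h2; simp [prow] at h2; omega
  | cons v rest ih =>
    intro j k h1 h2
    by_cases hv : v = 4
    · have hp : prow i j (v :: rest) = [j, i] :: prow i (j + 1) rest := by
        simp [prow, hv]
      rw [hp] at h2 ⊢
      by_cases he : k + 1 = num
      · have hidx : (num - k - 1).toNat = 0 := by omega
        simp [dBoxRow, hv, he, hidx]
      · simp only [dBoxRow, if_pos hv, if_neg he]
        rw [ih (j + 1) (k + 1) (by omega) (by simp at h2 ⊢; omega)]
        have hpos : (num - k - 1).toNat = (num - (k + 1) - 1).toNat + 1 := by omega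
        rw [hpos]
        simp
    · have hp : prow i j (v :: rest) = prow i (j + 1) rest := by
        simp [prow, hv]
      rw [hp] at h2 ⊢
      simp only [dBoxRow, if_neg hv]
      exact ih (j + 1) k h1 h2

theorem rowsA (rows : List (List Int)) (num : Int) :
    ∀ i k, dBoxRows num i k rows =
      if k < num ∧ num ≤ k + (pall i rows).length
      then (pall i rows)[(num - k - 1).toNat]? else none := by
  induction rows with
  | nil => intro i k; simp [dBoxRows, pall]
  | cons r rest ih =>
    intro i k
    have hp : pall i (r :: rest) = prow i 0 r ++ pall (i + 1) rest := rfl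
    by_cases hc : k < num ∧ num ≤ k + (prow i 0 r).length
    · -- found inside this row
      have hidx : (num - k - 1).toNat < (prow i 0 r).length := by omega
      have h1 := rowA_some r num i 0 k hc.1 hc.2
      rw [List.getElem?_eq_getElem hidx] at h1
      cases hd : dBoxRow num i 0 k r with
      | mk o k' =>
        rw [hd] at h1
        simp only at h1
        subst h1
        simp only [dBoxRows, hd]
        rw [hp]
        rw [if_pos (show k < num ∧ num ≤ k + ((prow i 0 r ++ pall (i + 1) rest).length : Int) from ⟨hc.1, by simp only [List.length_append]; push_cast; omega⟩)]
        rw [List.getElem?_append_left hidx, List.getElem?_eq_getElem hidx]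
    · -- not found in this row
      have h0 := rowA_none r num i 0 k hc
      simp only [dBoxRows, h0]
      rw [ih (i + 1) (k + (prow i 0 r).length), hp]
      by_cases hk : k < num
      · have hgt : k + ((prow i 0 r).length : Int) < num := by
          rcases not_and_or.1 hc with h | h
          · omega
          · omega
        by_cases h2 : num ≤ k + ((prow i 0 r).length : Int) + (pall (i + 1) rest).length
        · rw [if_pos ⟨hgt, by omega⟩, if_pos ⟨hk, by simp; omega⟩]
          rw [List.getElem?_append_right (by omega)]
          congr 1
          omega
        · rw [if_neg (by omega), if_neg (by simp; omega)]
      · rw [if_neg (by omega), if_neg (by omega)]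

-- ===== B-side lemmas =====

theorem prow_eq_map_cols (row : List Int) (i : Int) :
    ∀ j, prow i j row = (cols row j).map (fun c => [c, i]) := by
  induction row with
  | nil => intro j; simp [prow, cols]
  | cons v rest ih =>
    intro j
    by_cases hv : v = 4 <;> simp [prow, cols, hv, ih (j + 1)]

theorem count4_eq_cols_len (row : List Int) :
    ∀ k, count4 row = ((cols row k).length : Int) := by
  induction row with
  | nil => intro k; simp [count4, PySem.List.count, cols]
  | cons v rest ih =>
    intro k
    have h := ih (k + 1)
    simp only [count4, PySem.List.count] at h ⊢
    rw [List.count_cons]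
    by_cases hv : v = 4
    · have hb : (v == (4 : Int)) = true := by simp [hv]
      have hc : cols (v :: rest) k = k :: cols rest (k + 1) := by simp [cols, hv]
      rw [hc]
      simp only [hb, if_true, List.length_cons]
      push_cast
      omega
    · have hb : (v == (4 : Int)) = false := by simp [hv]
      have hc : cols (v :: rest) k = cols rest (k + 1) := by simp [cols, hv]
      rw [hc]
      simp only [hb, Bool.false_eq_true, if_false, Nat.add_zero]
      exact h

theorem cols_bounds (row : List Int) :
    ∀ k c, c ∈ cols row k → k ≤ c ∧ c < k + row.length := by
  induction row with
  | nil => intro k c hc; simp [cols] at hc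
  | cons v rest ih =>
    intro k c hc
    by_cases hv : v = 4 <;> simp [cols, hv] at hc
    · rcases hc with rfl | hc
      · simp only [List.length_cons]; push_cast; omega
      · have := ih (k + 1) c hc
        simp only [List.length_cons]; push_cast; omega
    · have := ih (k + 1) c hc
      simp only [List.length_cons]; push_cast; omega

theorem cols_pairwise (row : List Int) :
    ∀ k, (cols row k).Pairwise (· < ·) := by
  induction row with
  | nil => intro k; simp [cols]
  | cons v rest ih =>
    intro k
    by_cases hv : v = 4 <;> simp [cols, hv]
    · exact ⟨fun c hc => by have := (cols_bounds rest (k + 1) c hc).1; omega, ih (k + 1)⟩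
    · exact ih (k + 1)

theorem idx4Aux_eq_firstGE (row : List Int) :
    ∀ k s, idx4Aux row k s = firstGE (cols row k) s (k + row.length) := by
  induction row with
  | nil => intro k s; simp [idx4Aux, cols, firstGE]
  | cons v rest ih =>
    intro k s
    by_cases hv : v = 4
    · have hc : cols (v :: rest) k = k :: cols rest (k + 1) := by simp [cols, hv]
      by_cases hs : s ≤ k
      · have hyes : s ≤ k ∧ v = 4 := ⟨hs, hv⟩
        rw [hc]
        simp only [idx4Aux, firstGE]
        rw [if_pos hyes, if_pos hs]
      · have hne : ¬ (s ≤ k ∧ v = 4) := fun hh => hs hh.1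
        simp only [idx4Aux, if_neg hne, hc, firstGE, if_neg hs, ih (k + 1) s]
        congr 1
        push_cast [List.length_cons]
        ring
    · have hne : ¬ (s ≤ k ∧ v = 4) := fun hh => hv hh.2
      have hc : cols (v :: rest) k = cols rest (k + 1) := by simp [cols, hv]
      simp only [idx4Aux, if_neg hne, hc, ih (k + 1) s]
      congr 1
      push_cast [List.length_cons]
      ring

theorem nth4_eq_walk (row : List Int) :
    ∀ n j, nth4 row n j = walk (cols row 0) (row.length : Int) n j := by
  intro n
  induction n with
  | zero => intro j; simp [nth4, walk]
  | succ n ih =>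
    intro j
    simp only [nth4, walk, ih, idx4Aux_eq_firstGE row 0 (j + 1), zero_add]

theorem firstGE_mem_or_default (C : List Int) (s d : Int) :
    firstGE C s d ∈ C ∨ firstGE C s d = d := by
  induction C with
  | nil => simp [firstGE]
  | cons c cs ih =>
    by_cases hs : s ≤ c
    · simp [firstGE, hs]
    · simp only [firstGE, if_neg hs]
      rcases ih with h | h
      · exact Or.inl (List.mem_cons_of_mem _ h)
      · exact Or.inr h

theorem walk_cons (c : Int) (cs : List Int) (d : Int) :
    ∀ n j, c ≤ j → c < d → (∀ x ∈ cs, c < x) →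
      walk (c :: cs) d n j = walk cs d n j := by
  intro n
  induction n with
  | zero => intro j _ _ _; simp [walk]
  | succ n ih =>
    intro j hj hd hcs
    have hng : ¬ (j + 1 ≤ c) := by omega
    simp only [walk, firstGE, if_neg hng]
    apply ih
    · rcases firstGE_mem_or_default cs (j + 1) d with h | h
      · exact le_of_lt (hcs _ h)
      · omega
    · exact hd
    · exact hcs

theorem walk_spec :
    ∀ (n : Nat) (C : List Int) (d j : Int), C.Pairwise (· < ·) →
      (∀ c ∈ C, j < c) → (∀ c ∈ C, c < d) → ∀ (hn : n < C.length),
      walk C d (n + 1) j = C[n] := by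
  intro n
  induction n with
  | zero =>
    intro C d j _ hj _ hn
    cases C with
    | nil => simp at hn
    | cons c cs =>
      have : j + 1 ≤ c := by have := hj c (by simp); omega
      simp [walk, firstGE, this]
  | succ n ih =>
    intro C d j hpw hj hd hn
    cases C with
    | nil => simp at hn
    | cons c cs =>
      have hstep : firstGE (c :: cs) (j + 1) d = c := by
        have : j + 1 ≤ c := by have := hj c (by simp); omega
        simp [firstGE, this]
      have hcs : ∀ x ∈ cs, c < x := by
        intro x hx; exact (List.pairwise_cons.1 hpw).1 x hx
      show walk (c :: cs) d (n + 1) (firstGE (c :: cs) (j + 1) d) = _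
      rw [hstep, walk_cons c cs d (n + 1) c le_rfl (hd c (by simp)) hcs]
      have := ih cs d c (List.pairwise_cons.1 hpw).2 hcs
        (fun x hx => hd x (List.mem_cons_of_mem _ hx)) (by simpa using hn)
      simpa using this

-- the rem-th 4 in a row via repeated index calls equals the rem-th entry of prow
theorem rowB (row : List Int) (i rem : Int) (h1 : 1 ≤ rem) (h2 : rem ≤ count4 row) :
    (prow i 0 row)[(rem - 1).toNat]? = some [nth4 row rem.toNat (-1), i] := by
  have hc := count4_eq_cols_len row 0
  have hlt : (rem - 1).toNat < (cols row 0).length := by omega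
  rw [prow_eq_map_cols row i 0, List.getElem?_map, List.getElem?_eq_getElem hlt]
  have hn : rem.toNat = (rem - 1).toNat + 1 := by omega
  rw [nth4_eq_walk, hn,
    walk_spec ((rem - 1).toNat) (cols row 0) (row.length : Int) (-1)
      (cols_pairwise row 0)
      (fun c hc' => by have := (cols_bounds row 0 c hc').1; omega)
      (fun c hc' => by have := (cols_bounds row 0 c hc').2; omega)
      hlt]
  simp

theorem selectRow_fst_ge (cs : List Int) :
    ∀ i rem, i ≤ (selectRow cs i rem).1 := by
  induction cs with
  | nil => intro i rem; simp [selectRow]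
  | cons c cs ih =>
    intro i rem
    by_cases h : c < rem
    · simp only [selectRow, if_pos h]
      have := ih (i + 1) (rem - c)
      omega
    · simp [selectRow, h]

theorem pall_len (T : List (List Int)) :
    ∀ i, ((pall i T).length : Int) = (T.map count4).sum := by
  induction T with
  | nil => intro i; simp [pall]
  | cons r rest ih =>
    intro i
    have : ((prow i 0 r).length : Int) = count4 r := by
      rw [prow_eq_map_cols r i 0, count4_eq_cols_len r 0]; simp
    simp only [pall, List.length_append, List.map_cons, List.sum_cons]
    push_cast
    rw [this, ih (i + 1)]

theorem mainB (T : List (List Int)) :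
    ∀ i rem, 1 ≤ rem → rem ≤ ((pall i T).length : Int) →
      (match selectRow (T.map count4) i rem with
       | (i', rem') => some [nth4 ((T[(i' - i).toNat]?).getD []) rem'.toNat (-1), i'])
      = (pall i T)[(rem - 1).toNat]? := by
  induction T with
  | nil => intro i rem h1 h2; simp [pall] at h2; omega
  | cons r rest ih =>
    intro i rem h1 h2
    have hcnt : ((prow i 0 r).length : Int) = count4 r := by
      rw [prow_eq_map_cols r i 0, count4_eq_cols_len r 0]; simp
    have hp : pall i (r :: rest) = prow i 0 r ++ pall (i + 1) rest := rfl
    rw [hp] at h2 ⊢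
    simp only [List.map_cons, selectRow]
    by_cases h : count4 r < rem
    · rw [if_pos h]
      have hge := selectRow_fst_ge (rest.map count4) (i + 1) (rem - count4 r)
      have h2' : rem - count4 r ≤ ((pall (i + 1) rest).length : Int) := by
        rw [List.length_append] at h2; push_cast at h2; omega
      have := ih (i + 1) (rem - count4 r) (by omega) h2'
      cases hs : selectRow (rest.map count4) (i + 1) (rem - count4 r) with
      | mk i' rem' =>
        rw [hs] at this hge
        simp only at this hge ⊢
        have hidx : (i' - i).toNat = (i' - (i + 1)).toNat + 1 := by omega
        rw [hidx, List.getElem?_cons_succ]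
        rw [this]
        rw [List.getElem?_append_right (by omega)]
        congr 1
        omega
    · rw [if_neg h]
      simp only [sub_self, Int.toNat_zero, List.getElem?_cons_zero, Option.getD_some]
      rw [List.getElem?_append_left (by omega)]
      exact (rowB r i rem h1 (by omega)).symm

-- ===== VERDICT (by name: the statement is the Claim_ definition above) =====
theorem dBox_spec : Claim_equal_dBox := by
  intro num T _
  unfold Spec_dBox dBox dBox_alt
  rw [rowsA T num 0 0]
  have hlen := pall_len T 0
  by_cases hB : 1 ≤ num ∧ num ≤ (T.map count4).sum
  · rw [if_pos (show (0 : Int) < num ∧ num ≤ 0 + ((pall 0 T).length : Int) by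
      constructor <;> omega)]
    rw [if_pos hB]
    have hm := mainB T 0 num (by omega) (by omega)
    cases hs : selectRow (T.map count4) 0 num with
    | mk i' rem' =>
      rw [hs] at hm
      simp only [sub_zero] at hm
      rw [show num - 0 - 1 = num - 1 by ring]
      exact hm.symm
  · rw [if_neg (show ¬ ((0 : Int) < num ∧ num ≤ 0 + ((pall 0 T).length : Int)) by
      omega)]
    rw [if_neg hB]
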